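-- pv_equiv track=rewrite | github.com/s-surineni/atice | ppython/leet_code/max_area_of_cake.py | find_max_area
-- ===== SOURCE A (Python) =====
-- def find_max_area(hei, wid, hcuts, vcuts):
--     hcuts.sort()
--     vcuts.sort()
--
--     max_h = hcuts[0]
--
--     for idx, cut in enumerate(hcuts[1:]):
--         max_h = max(max_h, cut - hcuts[idx])
--
--     max_h = max(max_h, hei - hcuts[-1])
--
--
--     max_v = vcuts[0]
--
--     for idx, cut in enumerate(vcuts[1:]):
--         max_v = max(max_v, cut - vcuts[idx])
--
--     max_v = max(max_v, wid - vcuts[-1])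
--
--     return abs(max_h * max_v)
-- ===== SOURCE B (Python) =====
-- # B: selection-based max-gap per dimension -- repeatedly extract the minimum remaining cut
-- # and track the gap to the previous boundary, no sorting at all; NOTE: A sorts the caller's
-- # lists in place while B leaves them untouched (the equivalence claimed is about the return value).
-- def find_max_area(hei, wid, hcuts, vcuts):
--     def max_gap(limit, cuts):
--         remaining = list(cuts)
--         prev = 0
--         best = None
--         while remaining:
--             m = min(remaining)
--             remaining.remove(m)
--             best = m - prev if best is None else max(best, m - prev)
--             prev = m
--         return max(best, limit - prev)
--
--     return abs(max_gap(hei, hcuts) * max_gap(wid, vcuts))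
-- ===== Notes on version B (the rewrite author's own statement) =====
-- stated objective: alternative
-- what changed: B never sorts: each dimension's widest slice is found by repeatedly extracting the minimum remaining cut (selection) and tracking the gap to the previous boundary, replacing A's sort-then-scan-adjacent-differences.
import Mathlib
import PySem

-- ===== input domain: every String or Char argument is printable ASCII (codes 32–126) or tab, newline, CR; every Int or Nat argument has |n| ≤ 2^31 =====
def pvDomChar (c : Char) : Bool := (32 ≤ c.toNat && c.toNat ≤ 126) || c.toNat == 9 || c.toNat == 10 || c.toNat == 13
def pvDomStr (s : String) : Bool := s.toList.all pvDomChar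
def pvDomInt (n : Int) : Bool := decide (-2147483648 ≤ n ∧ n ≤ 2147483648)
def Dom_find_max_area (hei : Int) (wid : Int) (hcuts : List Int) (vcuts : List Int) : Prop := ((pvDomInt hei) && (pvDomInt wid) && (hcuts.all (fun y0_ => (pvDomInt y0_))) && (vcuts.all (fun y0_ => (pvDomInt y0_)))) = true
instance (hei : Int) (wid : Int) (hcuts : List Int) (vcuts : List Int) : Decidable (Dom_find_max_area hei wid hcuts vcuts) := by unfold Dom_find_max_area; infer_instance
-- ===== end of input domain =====

-- B finds each dimension's widest slice by repeatedly extracting the minimum remaining cut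
-- (selection, no sorting); A sorts the caller's lists in place while B does not, so the
-- equivalence proved here is about the return value only.

-- ===== PORT A =====
def find_max_area (hei : Int) (wid : Int) (hcuts : List Int) (vcuts : List Int) : Int :=
  let h := PySem.List.sorted hcuts (fun x => x) false
  let v := PySem.List.sorted vcuts (fun x => x) false
  -- max_h = hcuts[0]  (pyGetD: admitted only under Pre_, hcuts ≠ [])
  let max_h0 := PySem.List.pyGetD h 0 0
  -- for idx, cut in enumerate(hcuts[1:]): max_h = max(max_h, cut - hcuts[idx])
  let max_h1 := (PySem.List.enumerate (PySem.List.slice h (some 1) none) 0).foldl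
      (fun m p => max m (p.2 - PySem.List.pyGetD h p.1 0)) max_h0
  -- max_h = max(max_h, hei - hcuts[-1])
  let max_h := max max_h1 (hei - PySem.List.pyGetD h (-1) 0)
  let max_v0 := PySem.List.pyGetD v 0 0
  let max_v1 := (PySem.List.enumerate (PySem.List.slice v (some 1) none) 0).foldl
      (fun m p => max m (p.2 - PySem.List.pyGetD v p.1 0)) max_v0
  let max_v := max max_v1 (wid - PySem.List.pyGetD v (-1) 0)
  |max_h * max_v|

-- ===== PORT B =====
-- termination fact for the selection loop: removing the minimum shortens the list
theorem pvRestLen (x : Int) (t : List Int) :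
    ((PySem.List.remove? (x :: t)
        ((PySem.List.min? (x :: t) (fun y => y)).getD 0)).getD []).length
      < (x :: t).length := by
  have hmin : PySem.List.min? (x :: t) (fun y => y) = some (t.foldl min x) :=
    PySem.List.min?_id_cons x t
  have hmem : (t.foldl min x) ∈ (x :: t) := PySem.List.min?_mem hmin
  rw [hmin]
  simp only [Option.getD_some]
  rw [PySem.List.remove?_eq_some_erase (x :: t) _ hmem]
  simp only [Option.getD_some]
  have := List.length_erase_of_mem hmem
  simp only [List.length_cons] at *
  omega

-- the 'while remaining:' loop of B's max_gap
def pvSelLoop (limit prev : Int) (best : Option Int) : (remaining : List Int) → Int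
  | [] =>
    -- max(best, limit - prev); best = None only on empty cuts, where Python raises (outside Pre_)
    match best with
    | some b => max b (limit - prev)
    | none => limit - prev
  | x :: t =>
    let m := (PySem.List.min? (x :: t) (fun y => y)).getD 0
    let rest := (PySem.List.remove? (x :: t) m).getD []
    pvSelLoop limit m (some ((best.map (fun b => max b (m - prev))).getD (m - prev))) rest
  termination_by remaining => remaining.length
  decreasing_by exact pvRestLen x t

def pvMaxGapB (limit : Int) (cuts : List Int) : Int :=
  pvSelLoop limit 0 none cuts

def find_max_area_alt (hei : Int) (wid : Int) (hcuts : List Int) (vcuts : List Int) : Int :=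
  |pvMaxGapB hei hcuts * pvMaxGapB wid vcuts|

-- ===== PRECONDITION & SPEC =====
-- Pre_ excludes exactly the inputs on which A raises IndexError (hcuts[0] / vcuts[0] on an empty list).
def Pre_find_max_area (hei : Int) (wid : Int) (hcuts : List Int) (vcuts : List Int) : Prop :=
  hcuts ≠ [] ∧ vcuts ≠ []
instance (hei : Int) (wid : Int) (hcuts : List Int) (vcuts : List Int) : Decidable (Pre_find_max_area hei wid hcuts vcuts) := by unfold Pre_find_max_area; infer_instance

def pvWitness_find_max_area : Int × Int × List Int × List Int := (5, 4, [1, 3], [2])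

def Spec_find_max_area (hei : Int) (wid : Int) (hcuts : List Int) (vcuts : List Int) (out : Int) : Prop := out = find_max_area_alt hei wid hcuts vcuts
instance (hei : Int) (wid : Int) (hcuts : List Int) (vcuts : List Int) (out : Int) : Decidable (Spec_find_max_area hei wid hcuts vcuts out) := by unfold Spec_find_max_area; infer_instance

-- ===== CLAIM (what is proved, stated in full; the proofs are below) =====
def Claim_equal_find_max_area : Prop := ∀ (hei : Int) (wid : Int) (hcuts : List Int) (vcuts : List Int), Dom_find_max_area hei wid hcuts vcuts → Pre_find_max_area hei wid hcuts vcuts → Spec_find_max_area hei wid hcuts vcuts (find_max_area hei wid hcuts vcuts)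

-- ===== LEMMAS AND PROOFS =====

-- the selection loop replayed on an already-ordered list (proof-side recursion mirror)
def pvGFold (limit prev : Int) (best : Option Int) : List Int → Int
  | [] =>
    match best with
    | some b => max b (limit - prev)
    | none => limit - prev
  | x :: xs => pvGFold limit x (some ((best.map (fun b => max b (x - prev))).getD (x - prev))) xs

-- sorted (l) = min l :: sorted (l.erase (min l))
theorem pv_sorted_cons_min (x : Int) (t : List Int) :
    PySem.List.sorted (x :: t) (fun y => y) false
      = (t.foldl min x) :: PySem.List.sorted ((x :: t).erase (t.foldl min x)) (fun y => y) false := by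
  have hmin : PySem.List.min? (x :: t) (fun y => y) = some (t.foldl min x) :=
    PySem.List.min?_id_cons x t
  have hmem : (t.foldl min x) ∈ (x :: t) := PySem.List.min?_mem hmin
  have hlow : ∀ y ∈ (x :: t), (t.foldl min x) ≤ y := by
    intro y hy; exact PySem.List.min?_isMin hmin y hy
  apply PySem.List.sorted_id_eq_of_perm_of_pairwise
  · exact ((PySem.List.sorted_perm _ _ _).cons _).trans (List.perm_cons_erase hmem).symm
  · refine List.Pairwise.cons ?_ (PySem.List.sorted_pairwise _ _)
    intro y hy
    exact hlow y (((x :: t).erase_subset) ((PySem.List.mem_sorted _ _ _ _).1 hy))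

-- the selection loop equals the mirror replay on the sorted list
theorem pv_selLoop_eq_gfold (remaining : List Int) (limit prev : Int) (best : Option Int) :
    pvSelLoop limit prev best remaining
      = pvGFold limit prev best (PySem.List.sorted remaining (fun y => y) false) := by
  induction hn : remaining.length using Nat.strong_induction_on generalizing remaining prev best with
  | _ n ih =>
    match remaining with
    | [] => rw [pvSelLoop.eq_def]; simp [pvGFold, PySem.List.sorted]
    | x :: t =>
      rw [pvSelLoop, pv_sorted_cons_min, pvGFold]
      have hmin : PySem.List.min? (x :: t) (fun y => y) = some (t.foldl min x) :=
        PySem.List.min?_id_cons x t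
      have hmem : (t.foldl min x) ∈ (x :: t) := PySem.List.min?_mem hmin
      simp only [hmin, Option.getD_some, PySem.List.remove?_eq_some_erase (x :: t) _ hmem]
      have hlen : ((x :: t).erase (t.foldl min x)).length < n := by
        have := List.length_erase_of_mem hmem
        simp only [List.length_cons] at *
        omega
      exact ih _ hlen _ _ _ rfl

-- the replay on a strictly-consumed list, expressed as A's zip-pairs maximum
theorem pv_gfold_pairs (t : List Int) (limit prev b : Int) :
    pvGFold limit prev (some b) t
      = max (((prev :: t).zip t).foldl (fun m p => max m (p.2 - p.1)) b)
          (limit - (prev :: t).getLast (by simp)) := by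
  induction t generalizing prev b with
  | nil => simp [pvGFold]
  | cons x xs ih =>
    simp only [pvGFold, Option.map_some, Option.getD_some, List.zip_cons_cons, List.foldl_cons]
    rw [ih x (max b (x - prev))]
    congr 1

-- A's enumerate-with-index loop over (a :: t)[1:] is the fold over adjacent pairs of a :: t.
theorem pv_loopA (t pre : List Int) (a init : Int) :
    (PySem.List.enumerate t (pre.length : Int)).foldl
        (fun m p => max m (p.2 - PySem.List.pyGetD (pre ++ a :: t) p.1 0)) init
    = ((a :: t).zip t).foldl (fun m p => max m (p.2 - p.1)) init := by
  induction t generalizing pre a init with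
  | nil => simp [PySem.List.enumerate]
  | cons x xs ih =>
    rw [PySem.List.enumerate_cons]
    simp only [List.foldl_cons, List.zip_cons_cons]
    have hget : PySem.List.pyGetD (pre ++ a :: x :: xs) (pre.length : Int) 0 = a := by
      rw [PySem.List.pyGetD_natCast]
      simp [List.getD]
    rw [hget]
    have harr : ((pre.length : Int) + 1) = ((pre ++ [a]).length : Int) := by
      simp
    have hlist : pre ++ a :: x :: xs = (pre ++ [a]) ++ x :: xs := by simp
    rw [harr, hlist]
    exact ih (pre ++ [a]) x (max init (x - a))

-- B's selection maximum equals A's three-part computation over the sorted list.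
theorem pv_gap_eq (s : List Int) (hs : s ≠ []) (limit : Int) :
    pvMaxGapB limit s
    = max ((PySem.List.enumerate (PySem.List.slice
              (PySem.List.sorted s (fun y => y) false) (some 1) none) 0).foldl
            (fun m p => max m (p.2 - PySem.List.pyGetD (PySem.List.sorted s (fun y => y) false) p.1 0))
            (PySem.List.pyGetD (PySem.List.sorted s (fun y => y) false) 0 0))
        (limit - PySem.List.pyGetD (PySem.List.sorted s (fun y => y) false) (-1) 0) := by
  have hsne : PySem.List.sorted s (fun y => y) false ≠ [] := by
    simp [PySem.List.sorted_eq_nil_iff, hs]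
  obtain ⟨a, t, hat⟩ := List.exists_cons_of_ne_nil hsne
  unfold pvMaxGapB
  rw [pv_selLoop_eq_gfold, hat, pvGFold]
  simp only [Option.map_none, Option.getD_none]
  rw [pv_gfold_pairs]
  have hne : (a :: t) ≠ [] := by simp
  have hloop := pv_loopA t [] a (PySem.List.pyGetD (a :: t) 0 0)
  simp only [List.length_nil, Int.natCast_zero, List.nil_append] at hloop
  have hlast := PySem.List.pyGetD_neg_one (a :: t) 0 hne
  simp only [PySem.List.pyGetD_zero_cons] at hloop
  simp [PySem.List.slice_from_one, hlast, sub_zero, hloop]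

theorem find_max_area_spec : Claim_equal_find_max_area := by
  intro hei wid hcuts vcuts _ hpre
  obtain ⟨hh, hv⟩ := hpre
  unfold Spec_find_max_area
  simp only [find_max_area, find_max_area_alt]
  rw [pv_gap_eq _ hh hei, pv_gap_eq _ hv wid]
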